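-- pv_equiv track=rewrite | github.com/MakerDev/unittest | arousal/utils/eval_helper.py | find_events
-- ===== SOURCE A (Python) =====
-- def find_events(sequence):
--     events = []
--     in_event = False
--     start = 0
--     length = len(sequence)
--     for i in range(length):
--         if not in_event:
--             if sequence[i] == 1:
--                 in_event = True
--                 start = i
--         else:
--             if sequence[i] == 0:
--                 end = i - 1
--                 events.append((start, end))
--                 in_event = False
--
--     if in_event:
--         events.append((start, length - 1))
--
--     return events
-- ===== SOURCE B (Python) =====
-- def find_events(sequence):
--     # Pass 1: forward-fill an "active" mask (1 -> on, 0 -> off, other values carry).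
--     active = []
--     prev = False
--     for x in sequence:
--         if x == 1:
--             prev = True
--         elif x == 0:
--             prev = False
--         active.append(prev)
--     # Pass 2: collect maximal runs of True as inclusive (start, end) pairs.
--     events = []
--     run_start = None
--     for i, a in enumerate(active):
--         if a:
--             if run_start is None:
--                 run_start = i
--         else:
--             if run_start is not None:
--                 events.append((run_start, i - 1))
--                 run_start = None
--     if run_start is not None:
--         events.append((run_start, len(active) - 1))
--     return events
-- ===== Notes on version B (the rewrite author's own statement) =====
-- stated objective: alternative
-- what changed: Replaces A's single interleaved state machine (in_event flag mixed with event collection over indices) with two separate passes: first forward-fill a boolean 'active' mask over the values, then group maximal runs of True in the mask into inclusive (start, end) pairs.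
import Mathlib
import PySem

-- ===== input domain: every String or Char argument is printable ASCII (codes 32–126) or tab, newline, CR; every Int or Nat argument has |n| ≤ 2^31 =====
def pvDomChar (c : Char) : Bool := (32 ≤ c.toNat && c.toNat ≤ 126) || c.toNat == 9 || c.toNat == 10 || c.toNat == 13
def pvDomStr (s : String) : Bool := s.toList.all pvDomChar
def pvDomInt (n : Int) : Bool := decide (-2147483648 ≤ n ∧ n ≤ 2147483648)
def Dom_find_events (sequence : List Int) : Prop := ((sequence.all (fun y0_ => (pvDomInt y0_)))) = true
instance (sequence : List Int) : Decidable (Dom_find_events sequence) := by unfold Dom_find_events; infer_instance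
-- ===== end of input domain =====

-- B replaces A's single interleaved state machine with two passes (forward-filled
-- boolean mask, then grouping of True-runs); same cost, different decomposition.

-- ===== PORT A =====
-- A: one loop over indices with state (events, in_event, start), then a trailing close.
def find_events (sequence : List Int) : List (Int × Int) :=
  let length : Int := (sequence.length : Int)
  let s := (PySem.List.pyRange 0 length 1).foldl
    (fun (st : List (Int × Int) × Bool × Int) (i : Int) =>
      if !st.2.1 then
        if PySem.List.pyGetD sequence i 0 = 1 then (st.1, true, i) else st
      else
        if PySem.List.pyGetD sequence i 0 = 0 then (st.1 ++ [(st.2.2, i - 1)], false, st.2.2)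
        else st)
    ([], false, 0)
  if s.2.1 then s.1 ++ [(s.2.2, length - 1)] else s.1

-- ===== PORT B =====
-- B pass 1: forward-fill the boolean mask (1 -> true, 0 -> false, other carries).
-- B pass 2: group maximal runs of True into inclusive (start, end) pairs.
def find_events_alt (sequence : List Int) : List (Int × Int) :=
  let m := sequence.foldl
    (fun (acc : List Bool × Bool) (x : Int) =>
      let prev := if x = 1 then true else if x = 0 then false else acc.2
      (acc.1 ++ [prev], prev))
    ([], false)
  let active := m.1
  let g := (PySem.List.enumerate active 0).foldl
    (fun (st : List (Int × Int) × Option Int) (p : Int × Bool) =>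
      if p.2 then
        match st.2 with
        | none => (st.1, some p.1)
        | some _ => st
      else
        match st.2 with
        | some s => (st.1 ++ [(s, p.1 - 1)], none)
        | none => st)
    ([], none)
  match g.2 with
  | some s => g.1 ++ [(s, (active.length : Int) - 1)]
  | none => g.1

-- ===== PRECONDITION & SPEC =====
def Spec_find_events (sequence : List Int) (out : List (Int × Int)) : Prop := out = find_events_alt sequence
instance (sequence : List Int) (out : List (Int × Int)) : Decidable (Spec_find_events sequence out) := by unfold Spec_find_events; infer_instance

-- ===== CLAIM (what is proved, stated in full; the proofs are below) =====
def Claim_equal_find_events : Prop := ∀ (sequence : List Int), Dom_find_events sequence → Spec_find_events sequence (find_events sequence)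

-- ===== LEMMAS AND PROOFS =====

-- Reference recursion for A's loop (suffix view, index carried explicitly).
def loopA (b : Bool) (st : Int) (i : Int) : List Int → List (Int × Int)
  | [] => if b then [(st, i - 1)] else []
  | x :: t =>
      if !b then
        if x = 1 then loopA true i (i + 1) t else loopA false st (i + 1) t
      else
        if x = 0 then (st, i - 1) :: loopA false st (i + 1) t else loopA true st (i + 1) t

-- Reference recursion for B's mask pass.
def maskRec (b : Bool) : List Int → List Bool
  | [] => []
  | x :: t =>
      let p := if x = 1 then true else if x = 0 then false else b
      p :: maskRec p t

-- Reference recursion for B's grouping pass.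
def loopG (rs : Option Int) (i : Int) : List Bool → List (Int × Int)
  | [] => match rs with | some s => [(s, i - 1)] | none => []
  | a :: t =>
      if a then
        match rs with
        | none => loopG (some i) (i + 1) t
        | some s => loopG (some s) (i + 1) t
      else
        match rs with
        | some s => (s, i - 1) :: loopG none (i + 1) t
        | none => loopG none (i + 1) t

-- A's fold (over the range of indices of pre ++ xs starting at |pre|) plus its
-- trailing close equals ev ++ loopA.
lemma foldA_eq_loopA (xs : List Int) : ∀ (pre : List Int) (ev : List (Int × Int)) (b : Bool) (st : Int),
    (let s := (PySem.List.pyRange (pre.length : Int) ((pre.length : Int) + (xs.length : Int)) 1).foldl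
      (fun (st : List (Int × Int) × Bool × Int) (i : Int) =>
        if !st.2.1 then
          if PySem.List.pyGetD (pre ++ xs) i 0 = 1 then (st.1, true, i) else st
        else
          if PySem.List.pyGetD (pre ++ xs) i 0 = 0 then (st.1 ++ [(st.2.2, i - 1)], false, st.2.2)
          else st)
      (ev, b, st)
     if s.2.1 then s.1 ++ [(s.2.2, (pre.length : Int) + (xs.length : Int) - 1)] else s.1)
    = ev ++ loopA b st (pre.length : Int) xs := by
  induction xs with
  | nil =>
    intro pre ev b st
    rw [show ((pre.length : Int) + (([] : List Int).length : Int)) = (pre.length : Int) from by simp]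
    rw [PySem.List.pyRange_one_eq_nil le_rfl]
    cases b <;> simp [loopA]
  | cons x t ih =>
    intro pre ev b st
    have hpos : (0 : Int) < ((x :: t).length : Int) := by exact_mod_cast Nat.succ_pos t.length
    have hlt : (pre.length : Int) < (pre.length : Int) + ((x :: t).length : Int) := by omega
    rw [PySem.List.pyRange_one_cons hlt]
    have hget : PySem.List.pyGetD (pre ++ x :: t) (pre.length : Int) 0 = x := by
      rw [PySem.List.pyGetD_eq_getElem (pre ++ x :: t) 0 (by omega) (by simp)]
      simp
    have hcons : pre ++ x :: t = (pre ++ [x]) ++ t := by simp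
    have hl1 : (pre.length : Int) + 1 = ((pre ++ [x]).length : Int) := by simp
    have hl2 : (pre.length : Int) + ((x :: t).length : Int)
        = ((pre ++ [x]).length : Int) + (t.length : Int) := by
      simp only [List.length_append, List.length_cons, List.length_nil]
      push_cast
      ring
    simp only [List.foldl_cons, hget, loopA]
    by_cases hb : b
    · subst hb
      simp only [Bool.not_true, Bool.false_eq_true, if_false]
      by_cases hx0 : x = 0
      · simp only [if_pos hx0]
        rw [hcons, hl1, hl2]
        rw [ih (pre ++ [x]) (ev ++ [(st, (pre.length : Int) - 1)]) false st]
        simp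
      · simp only [if_neg hx0]
        rw [hcons, hl1, hl2]
        rw [ih (pre ++ [x]) ev true st]
    · simp only [Bool.not_eq_true] at hb; subst hb
      simp only [Bool.not_false, if_true]
      by_cases hx1 : x = 1
      · simp only [if_pos hx1]
        rw [hcons, hl1, hl2]
        rw [ih (pre ++ [x]) ev true (pre.length : Int)]
      · simp only [if_neg hx1]
        rw [hcons, hl1, hl2]
        rw [ih (pre ++ [x]) ev false st]

-- B's mask fold equals the reference recursion (accumulator is a prefix).
lemma maskFold_eq (xs : List Int) : ∀ (acc : List Bool) (b : Bool),
    xs.foldl (fun (acc : List Bool × Bool) (x : Int) =>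
        let prev := if x = 1 then true else if x = 0 then false else acc.2
        (acc.1 ++ [prev], prev)) (acc, b)
      = (acc ++ maskRec b xs, xs.foldl (fun b x => if x = 1 then true else if x = 0 then false else b) b) := by
  induction xs with
  | nil => intro acc b; simp [maskRec]
  | cons x t ih =>
    intro acc b
    simp only [List.foldl_cons, maskRec]
    rw [ih]
    simp

-- B's grouping fold plus its trailing close equals ev ++ loopG.
lemma foldG_eq_loopG (m : List Bool) : ∀ (i0 : Int) (ev : List (Int × Int)) (rs : Option Int),
    (let g := (PySem.List.enumerate m i0).foldl
      (fun (st : List (Int × Int) × Option Int) (p : Int × Bool) =>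
        if p.2 then
          match st.2 with
          | none => (st.1, some p.1)
          | some _ => st
        else
          match st.2 with
          | some s => (st.1 ++ [(s, p.1 - 1)], none)
          | none => st)
      (ev, rs)
     match g.2 with
     | some s => g.1 ++ [(s, i0 + (m.length : Int) - 1)]
     | none => g.1)
    = ev ++ loopG rs i0 m := by
  induction m with
  | nil =>
    intro i0 ev rs
    cases rs <;> simp [PySem.List.enumerate_nil, loopG]
  | cons a t ih =>
    intro i0 ev rs
    rw [PySem.List.enumerate_cons]
    simp only [List.foldl_cons]
    have harith : i0 + ((a :: t).length : Int) - 1 = (i0 + 1) + ((t.length : Int)) - 1 := by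
      simp; omega
    cases a
    · cases rs with
      | none =>
        simp only [loopG, Bool.false_eq_true, if_false]
        rw [harith, ih (i0 + 1) ev none]
      | some s =>
        simp only [loopG, Bool.false_eq_true, if_false]
        rw [harith, ih (i0 + 1) (ev ++ [(s, i0 - 1)]) none]
        simp
    · cases rs with
      | none =>
        simp only [loopG, if_true]
        rw [harith, ih (i0 + 1) ev (some i0)]
      | some s =>
        simp only [loopG, if_true]
        rw [harith, ih (i0 + 1) ev (some s)]

-- Fusion: A's state machine on the values equals B's grouping of the mask.
lemma loopA_eq_loopG (xs : List Int) : ∀ (b : Bool) (st i : Int),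
    loopA b st i xs = loopG (if b then some st else none) i (maskRec b xs) := by
  induction xs with
  | nil => intro b st i; cases b <;> simp [loopA, loopG, maskRec]
  | cons x t ih =>
    intro b st i
    by_cases hx1 : x = 1
    · cases b <;> simp [maskRec, loopA, loopG, hx1, ih]
    · by_cases hx0 : x = 0
      · cases b <;> simp [maskRec, loopA, loopG, hx0, ih]
      · cases b <;> simp [maskRec, loopA, loopG, hx1, hx0, ih]

-- ===== VERDICT (by name: the statement is the Claim_ definition above) =====
theorem find_events_spec : Claim_equal_find_events := by
  intro sequence _
  show find_events sequence = find_events_alt sequence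
  have h1 : find_events sequence = loopA false 0 0 sequence := by
    have hA := foldA_eq_loopA sequence [] [] false 0
    simpa [find_events] using hA
  have h2 : find_events_alt sequence = loopG none 0 (maskRec false sequence) := by
    have hG := foldG_eq_loopG (maskRec false sequence) 0 [] none
    simp only [find_events_alt]
    rw [maskFold_eq sequence [] false]
    simpa using hG
  rw [h1, h2, loopA_eq_loopG sequence false 0 0]
  simp
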